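-- pv_equiv track=rewrite | github.com/Panikos/Protocol2USDM | rendering/m11_renderer.py | _distribute_to_subsections
-- ===== SOURCE A (Python) =====
-- from typing import Any, Dict, List, Optional
--
-- def _distribute_to_subsections(
--     narrative_text: str,
--     subheadings: List[tuple],
-- ) -> Dict[str, str]:
--     """Distribute narrative paragraphs to M11 sub-sections by keyword matching.
--
--     Splits the narrative into paragraphs and scores each against the sub-heading
--     keyword lists.  Returns a dict mapping sub_number → matched text, plus
--     '_general' for unmatched paragraphs.
--
--     Args:
--         narrative_text: Full narrative text for the section
--         subheadings: List of (sub_number, title, level, keywords) tuples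
--
--     Returns:
--         Dict mapping sub_number → concatenated paragraph text
--     """
--     paragraphs = [p.strip() for p in narrative_text.split('\n') if p.strip()]
--     if not paragraphs:
--         return {'_general': ''}
--
--     # Build buckets
--     buckets: Dict[str, List[str]] = {'_general': []}
--     for sub_num, _title, _level, _kw in subheadings:
--         buckets[sub_num] = []
--
--     for para in paragraphs:
--         para_lower = para.lower()
--         best_sub = None
--         best_score = 0
--
--         for sub_num, _title, _level, keywords in subheadings:
--             score = sum(1 for kw in keywords if kw.lower() in para_lower)
--             if score > best_score:
--                 best_score = score
--                 best_sub = sub_num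
--
--         if best_sub and best_score > 0:
--             buckets[best_sub].append(para)
--         else:
--             buckets['_general'].append(para)
--
--     # Join each bucket
--     return {k: '\n'.join(v) for k, v in buckets.items()}
-- ===== SOURCE B (Python) =====
-- def _distribute_to_subsections(narrative_text, subheadings):
--     """Alternative decomposition: subsection-major sweep.  Instead of scoring all
--     subsections per paragraph, fold over subsections updating a per-paragraph
--     champions array (each keyword list lowered once), then group per key."""
--     paragraphs = [p.strip() for p in narrative_text.split('\n') if p.strip()]
--     if not paragraphs:
--         return {'_general': ''}
--
--     lowers = [p.lower() for p in paragraphs]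
--     best = [(None, 0)] * len(paragraphs)  # running (sub, score) champion per paragraph
--     for sub, _t, _l, kws in subheadings:
--         lk = [k.lower() for k in kws]
--         best = [
--             ((sub, s) if b[1] < s else b)
--             for b, pl in zip(best, lowers)
--             for s in [sum(1 for k in lk if k in pl)]
--         ]
--
--     keys = ['_general']
--     for sub, _t, _l, _k in subheadings:
--         if sub not in keys:
--             keys.append(sub)
--
--     def key_of(b):
--         sub, sc = b
--         return sub if (sub and sc > 0) else '_general'
--
--     return {k: '\n'.join(p for p, b in zip(paragraphs, best) if key_of(b) == k)
--             for k in keys}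
-- ===== Notes on version B (the rewrite author's own statement) =====
-- stated objective: alternative
-- what changed: B interchanges the loops: instead of A's paragraph-major scan that re-lowers every keyword and runs an argmax fold per paragraph into mutable dict buckets, B sweeps subsection-major, lowering each keyword list once and updating a per-paragraph champions array, then groups the assignment per key in a final pass.
import Mathlib
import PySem

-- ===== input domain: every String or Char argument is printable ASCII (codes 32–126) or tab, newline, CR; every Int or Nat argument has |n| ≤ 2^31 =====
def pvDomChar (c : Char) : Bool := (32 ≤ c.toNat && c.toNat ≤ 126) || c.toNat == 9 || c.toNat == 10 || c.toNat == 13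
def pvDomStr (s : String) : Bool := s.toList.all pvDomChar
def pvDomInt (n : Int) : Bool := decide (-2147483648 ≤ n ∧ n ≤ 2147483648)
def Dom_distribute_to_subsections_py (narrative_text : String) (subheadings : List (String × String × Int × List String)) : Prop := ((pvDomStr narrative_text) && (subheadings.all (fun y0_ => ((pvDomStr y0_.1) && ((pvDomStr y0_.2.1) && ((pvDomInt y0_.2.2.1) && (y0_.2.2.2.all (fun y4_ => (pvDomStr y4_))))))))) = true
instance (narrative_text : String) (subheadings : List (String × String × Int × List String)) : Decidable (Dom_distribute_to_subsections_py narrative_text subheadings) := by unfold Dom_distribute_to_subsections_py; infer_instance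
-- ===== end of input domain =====

-- B interchanges the loops (subsection-major sweep over a per-paragraph champions array,
-- each keyword list lowered once, final grouping pass) instead of A's paragraph-major
-- argmax into mutable dict buckets; same return value, proved equal.

-- ===== PORT A =====
def distribute_to_subsections_py (narrative_text : String) (subheadings : List (String × String × Int × List String)) : List (String × String) :=
  let paragraphs := ((PySem.Str.split? narrative_text "\n").getD []).filterMap
    (fun p => let s := PySem.Str.strip p; if s = "" then none else some s)
  if paragraphs = [] then [("_general", "")]
  else
    let buckets : PySem.Dict String (List String) :=
      subheadings.foldl (fun d h => d.insert h.1 []) (PySem.Dict.empty.insert "_general" ([] : List String))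
    let buckets := paragraphs.foldl (fun d para =>
      let para_lower := PySem.Str.lower para
      let best := subheadings.foldl (fun (acc : Option String × Int) h =>
          let score := h.2.2.2.foldl
            (fun n kw => if PySem.Str.isIn (PySem.Str.lower kw) para_lower then n + 1 else n) (0 : Int)
          if acc.2 < score then (some h.1, score) else acc) ((none : Option String), (0 : Int))
      if best.1.getD "" ≠ "" ∧ 0 < best.2 then d.modify (best.1.getD "") [] (· ++ [para])
      else d.modify "_general" [] (· ++ [para])) buckets
    buckets.items.map (fun kv => (kv.1, PySem.Str.join "\n" kv.2))

-- ===== PORT B =====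
def distribute_to_subsections_py_alt (narrative_text : String) (subheadings : List (String × String × Int × List String)) : List (String × String) :=
  let paragraphs := ((PySem.Str.split? narrative_text "\n").getD []).filterMap
    (fun p => let s := PySem.Str.strip p; if s = "" then none else some s)
  if paragraphs = [] then [("_general", "")]
  else
    let lowers := paragraphs.map PySem.Str.lower
    let best : List (Option String × Int) :=
      List.replicate paragraphs.length ((none : Option String), (0 : Int))
    let best := subheadings.foldl (fun best h =>
      let lk := h.2.2.2.map PySem.Str.lower
      List.zipWith (fun (b : Option String × Int) pl =>
        let s : Int := ((lk.countP (fun k => PySem.Str.isIn k pl)) : Int)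
        if b.2 < s then (some h.1, s) else b) best lowers) best
    let keys := subheadings.foldl (fun ks h => if ks.contains h.1 then ks else ks ++ [h.1]) ["_general"]
    let key_of : Option String × Int → String := fun b =>
      if b.1.getD "" ≠ "" ∧ 0 < b.2 then b.1.getD "" else "_general"
    keys.map (fun k => (k, PySem.Str.join "\n"
      (((paragraphs.zip best).filter (fun pb => key_of pb.2 == k)).map (fun pb => pb.1))))

-- ===== PRECONDITION & SPEC =====
def Spec_distribute_to_subsections_py (narrative_text : String) (subheadings : List (String × String × Int × List String)) (out : List (String × String)) : Prop := out = distribute_to_subsections_py_alt narrative_text subheadings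
instance (narrative_text : String) (subheadings : List (String × String × Int × List String)) (out : List (String × String)) : Decidable (Spec_distribute_to_subsections_py narrative_text subheadings out) := by unfold Spec_distribute_to_subsections_py; infer_instance

-- ===== CLAIM (what is proved, stated in full; the proofs are below) =====
def Claim_equal_distribute_to_subsections_py : Prop := ∀ (narrative_text : String) (subheadings : List (String × String × Int × List String)), Dom_distribute_to_subsections_py narrative_text subheadings → Spec_distribute_to_subsections_py narrative_text subheadings (distribute_to_subsections_py narrative_text subheadings)

-- ===== LEMMAS AND PROOFS =====

-- common per-paragraph score, champion fold and final key
def pvScore (kws : List String) (pl : String) : Int :=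
  ((kws.countP (fun kw => PySem.Str.isIn (PySem.Str.lower kw) pl)) : Int)

def pvBest (subs : List (String × String × Int × List String)) (pl : String) : Option String × Int :=
  subs.foldl (fun (acc : Option String × Int) h =>
    if acc.2 < pvScore h.2.2.2 pl then (some h.1, pvScore h.2.2.2 pl) else acc)
    ((none : Option String), (0 : Int))

def pvKey (subs : List (String × String × Int × List String)) (para : String) : String :=
  if (pvBest subs (PySem.Str.lower para)).1.getD "" ≠ "" ∧ 0 < (pvBest subs (PySem.Str.lower para)).2
  then (pvBest subs (PySem.Str.lower para)).1.getD "" else "_general"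

def pvKeysL (subs : List (String × String × Int × List String)) : List String :=
  PySem.Set.update ["_general"] (subs.map (fun h => h.1))

def pvAssigned (subs : List (String × String × Int × List String)) (paragraphs : List String) : List (String × String) :=
  paragraphs.map (fun para => (pvKey subs para, para))

-- A's inner argmax fold is pvBest
lemma pvBestA (subs : List (String × String × Int × List String)) (pl : String) :
    subs.foldl (fun (acc : Option String × Int) h =>
      let score := h.2.2.2.foldl
        (fun n kw => if PySem.Str.isIn (PySem.Str.lower kw) pl then n + 1 else n) (0 : Int)
      if acc.2 < score then (some h.1, score) else acc) ((none : Option String), (0 : Int))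
    = pvBest subs pl := by
  unfold pvBest
  apply PySem.List.foldl_congr_mem
  intro acc h _
  have : h.2.2.2.foldl (fun n kw => if PySem.Str.isIn (PySem.Str.lower kw) pl then n + 1 else n) (0 : Int)
      = pvScore h.2.2.2 pl := by
    rw [PySem.List.foldl_if_add_one]; unfold pvScore; simp
  simp only [this]

lemma pvBest_fst (subs : List (String × String × Int × List String)) (pl : String) :
    ∀ acc : Option String × Int,
      (subs.foldl (fun (acc : Option String × Int) h =>
        if acc.2 < pvScore h.2.2.2 pl then (some h.1, pvScore h.2.2.2 pl) else acc) acc).1 = acc.1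
      ∨ ∃ h ∈ subs, (subs.foldl (fun (acc : Option String × Int) h =>
        if acc.2 < pvScore h.2.2.2 pl then (some h.1, pvScore h.2.2.2 pl) else acc) acc).1 = some h.1 := by
  induction subs with
  | nil => intro acc; left; rfl
  | cons a t ih =>
    intro acc
    simp only [List.foldl_cons]
    rcases ih (if acc.2 < pvScore a.2.2.2 pl then (some a.1, pvScore a.2.2.2 pl) else acc) with h1 | ⟨h, hh, h1⟩
    · rw [h1]
      split_ifs
      · right; exact ⟨a, by simp, rfl⟩
      · left; rfl
    · right; exact ⟨h, by simp [hh], h1⟩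

lemma pvSetUpdate_of_mem (s : List String) (xs : List String) (h : ∀ x ∈ xs, x ∈ s) :
    PySem.Set.update s xs = s := by
  induction xs generalizing s with
  | nil => rfl
  | cons x t ih =>
    have hx : PySem.Set.add s x = s := by
      rw [PySem.Set.add]
      rw [if_pos (by simp only [PySem.Set.contains, List.contains_iff_mem]; exact h x (by simp))]
    show PySem.Set.update (PySem.Set.add s x) t = s
    rw [hx]
    exact ih s (fun y hy => h y (by simp [hy]))

lemma pvMem_update_left (s : List String) (xs : List String) (a : String) (h : a ∈ s) :
    a ∈ PySem.Set.update s xs := by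
  induction xs generalizing s with
  | nil => exact h
  | cons x t ih =>
    show a ∈ PySem.Set.update (PySem.Set.add s x) t
    apply ih
    rw [PySem.Set.add]
    split_ifs
    · exact h
    · simp [h]

lemma pvMem_update_right (s : List String) (xs : List String) (a : String) (h : a ∈ xs) :
    a ∈ PySem.Set.update s xs := by
  induction xs generalizing s with
  | nil => simp at h
  | cons x t ih =>
    rcases List.mem_cons.mp h with rfl | ht
    · show a ∈ PySem.Set.update (PySem.Set.add s a) t
      apply pvMem_update_left
      rw [PySem.Set.add]
      split_ifs with hc
      · simpa [List.contains_iff_mem] using hc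
      · simp
    · exact ih (PySem.Set.add s x) ht

lemma pvKey_mem (subs : List (String × String × Int × List String)) (para : String) :
    pvKey subs para ∈ pvKeysL subs := by
  unfold pvKey pvKeysL
  have hgen : "_general" ∈ PySem.Set.update ["_general"] (subs.map (fun h => h.1)) :=
    pvMem_update_left _ _ _ (by simp)
  split_ifs with h0
  · rcases pvBest_fst subs (PySem.Str.lower para) ((none : Option String), (0 : Int)) with h1 | ⟨h, hh, h1⟩
    · exfalso; apply h0.1; unfold pvBest; rw [h1]; rfl
    · have h2 : (pvBest subs (PySem.Str.lower para)).1 = some h.1 := h1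
      rw [h2]
      exact pvMem_update_right _ _ _ (List.mem_map.mpr ⟨h, hh, rfl⟩)
  · exact hgen

-- the initial buckets map every key to []
lemma pvBuckets0_getD (subs : List (String × String × Int × List String)) (k : String) :
    (subs.foldl (fun d h => d.insert h.1 ([] : List String)) (PySem.Dict.empty.insert "_general" ([] : List String))).getD k [] = [] := by
  have H : ∀ (l : List (String × String × Int × List String)) (d : PySem.Dict String (List String)),
      (∀ k, d.getD k [] = []) → ∀ k, (l.foldl (fun d h => d.insert h.1 []) d).getD k [] = [] := by
    intro l
    induction l with
    | nil => intro d hd k; exact hd k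
    | cons a t ih =>
      intro d hd k
      simp only [List.foldl_cons]
      apply ih
      intro k'
      rw [PySem.Dict.getD_insert]
      split_ifs
      · rfl
      · exact hd k'
  apply H
  intro k'
  rw [PySem.Dict.getD_insert]
  split_ifs
  · rfl
  · rw [PySem.Dict.getD_empty]

lemma pvKeys0 : (PySem.Dict.empty.insert "_general" ([] : List String)).keys = ["_general"] := by
  simp [pysem]

lemma pvB0_keys (subs : List (String × String × Int × List String)) :
    (subs.foldl (fun d h => d.insert h.1 ([] : List String)) (PySem.Dict.empty.insert "_general" ([] : List String))).keys
      = pvKeysL subs := by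
  rw [PySem.Dict.keys_foldl_insert_key subs (fun h => h.1) (fun _ _ => ([] : List String)) (PySem.Dict.empty.insert "_general" []), pvKeys0]
  rfl

-- A's output equals the canonical grouping of pvAssigned over pvKeysL
lemma pvAout (subs : List (String × String × Int × List String)) (P : List String) :
    ((P.foldl (fun d para =>
        let para_lower := PySem.Str.lower para
        let best := subs.foldl (fun (acc : Option String × Int) h =>
          let score := h.2.2.2.foldl
            (fun n kw => if PySem.Str.isIn (PySem.Str.lower kw) para_lower then n + 1 else n) (0 : Int)
          if acc.2 < score then (some h.1, score) else acc) ((none : Option String), (0 : Int))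
        if best.1.getD "" ≠ "" ∧ 0 < best.2 then d.modify (best.1.getD "") [] (· ++ [para])
        else d.modify "_general" [] (· ++ [para]))
        (subs.foldl (fun d h => d.insert h.1 ([] : List String)) (PySem.Dict.empty.insert "_general" ([] : List String)))).items).map
      (fun kv => (kv.1, PySem.Str.join "\n" kv.2))
    = (pvKeysL subs).map (fun k => (k, PySem.Str.join "\n" (((pvAssigned subs P).filter (fun ap => ap.1 == k)).map (fun ap => ap.2)))) := by
  have hstep : P.foldl (fun d para =>
        let para_lower := PySem.Str.lower para
        let best := subs.foldl (fun (acc : Option String × Int) h =>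
          let score := h.2.2.2.foldl
            (fun n kw => if PySem.Str.isIn (PySem.Str.lower kw) para_lower then n + 1 else n) (0 : Int)
          if acc.2 < score then (some h.1, score) else acc) ((none : Option String), (0 : Int))
        if best.1.getD "" ≠ "" ∧ 0 < best.2 then d.modify (best.1.getD "") [] (· ++ [para])
        else d.modify "_general" [] (· ++ [para]))
        (subs.foldl (fun d h => d.insert h.1 ([] : List String)) (PySem.Dict.empty.insert "_general" ([] : List String)))
      = P.foldl (fun d para => d.modify (pvKey subs para) [] (· ++ [para]))
        (subs.foldl (fun d h => d.insert h.1 ([] : List String)) (PySem.Dict.empty.insert "_general" ([] : List String))) := by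
    apply PySem.List.foldl_congr_mem
    intro d para _
    simp only [pvBestA]
    unfold pvKey
    split_ifs <;> rfl
  rw [hstep]
  have hfold2 : P.foldl (fun d para => d.modify (pvKey subs para) [] (· ++ [para]))
        (subs.foldl (fun d h => d.insert h.1 ([] : List String)) (PySem.Dict.empty.insert "_general" ([] : List String)))
      = (pvAssigned subs P).foldl (fun d p => d.modify p.1 [] (· ++ [p.2]))
        (subs.foldl (fun d h => d.insert h.1 ([] : List String)) (PySem.Dict.empty.insert "_general" ([] : List String))) := by
    unfold pvAssigned
    rw [List.foldl_map]
  rw [hfold2]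
  have hnd0 : (subs.foldl (fun d h => d.insert h.1 ([] : List String)) (PySem.Dict.empty.insert "_general" ([] : List String))).keys.Nodup := by
    apply PySem.Dict.nodup_keys_foldl_insert_key subs (fun h => h.1) (fun _ _ => ([] : List String))
    rw [pvKeys0]
    simp
  have hnd : ((pvAssigned subs P).foldl (fun d p => d.modify p.1 [] (· ++ [p.2])) (subs.foldl (fun d h => d.insert h.1 ([] : List String)) (PySem.Dict.empty.insert "_general" ([] : List String)))).keys.Nodup := by
    apply PySem.Dict.nodup_keys_foldl_modify_key (pvAssigned subs P) (fun p => p.1) ([] : List String) (fun _ p => (· ++ [p.2]))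
    exact hnd0
  rw [PySem.Dict.items_eq_map_keys _ hnd ([] : List String)]
  have hkeys : ((pvAssigned subs P).foldl (fun d p => d.modify p.1 [] (· ++ [p.2])) (subs.foldl (fun d h => d.insert h.1 ([] : List String)) (PySem.Dict.empty.insert "_general" ([] : List String)))).keys = pvKeysL subs := by
    rw [PySem.Dict.keys_foldl_modify_key (pvAssigned subs P) (fun p => p.1) ([] : List String) (fun _ p => (· ++ [p.2]))]
    rw [pvB0_keys]
    apply pvSetUpdate_of_mem
    intro x hx
    rw [List.mem_map] at hx
    obtain ⟨p, hp, rfl⟩ := hx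
    unfold pvAssigned at hp
    rw [List.mem_map] at hp
    obtain ⟨para, _, rfl⟩ := hp
    exact pvKey_mem subs para
  rw [hkeys, List.map_map]
  apply List.map_congr_left
  intro k _
  simp only [Function.comp]
  rw [PySem.Dict.getD_foldl_modify_append, pvBuckets0_getD]
  rw [List.nil_append]

-- loop interchange: a fold of zipWith steps over a mapped initial array
-- is the map of the pointwise folds (the champions array commutes with the sweep)
lemma pvZipFold {α β γ : Type} (subs : List γ) (F : γ → α → β → α) (l : List β) :
    ∀ (g : β → α),
      subs.foldl (fun bs h => List.zipWith (F h) bs l) (l.map g)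
        = l.map (fun x => subs.foldl (fun b h => F h b x) (g x)) := by
  induction subs with
  | nil => intro g; rfl
  | cons a t ih =>
    intro g
    simp only [List.foldl_cons]
    have h1 : ∀ (m : List β), List.zipWith (F a) (m.map g) m = m.map (fun x => F a (g x) x) := by
      intro m
      induction m with
      | nil => rfl
      | cons x t iht => simp only [List.map_cons, List.zipWith_cons_cons, iht]
    rw [h1, ih]

lemma pvRepMap {α β : Type} (x : α) : ∀ (l : List β), List.replicate l.length x = l.map (fun _ => x) := by
  intro l
  induction l with
  | nil => rfl
  | cons a t ih =>
    simp only [List.length_cons, List.replicate_succ, List.map_cons]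
    rw [ih]

lemma pvZipSelf {α β : Type} (f : α → β) : ∀ (l : List α), l.zip (l.map f) = l.map (fun a => (a, f a)) := by
  intro l
  induction l with
  | nil => rfl
  | cons a t ih => simp [ih]

-- B's output equals the same canonical grouping
lemma pvBout (subs : List (String × String × Int × List String)) (P : List String) :
    (subs.foldl (fun ks h => if ks.contains h.1 then ks else ks ++ [h.1]) ["_general"]).map
      (fun k => (k, PySem.Str.join "\n"
        (((P.zip (subs.foldl (fun best h =>
            let lk := h.2.2.2.map PySem.Str.lower
            List.zipWith (fun (b : Option String × Int) pl =>
              let s : Int := ((lk.countP (fun k => PySem.Str.isIn k pl)) : Int)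
              if b.2 < s then (some h.1, s) else b) best (P.map PySem.Str.lower))
            (List.replicate P.length ((none : Option String), (0 : Int))))).filter
          (fun pb => (if pb.2.1.getD "" ≠ "" ∧ 0 < pb.2.2 then pb.2.1.getD "" else "_general") == k)).map (fun pb => pb.1))))
    = (pvKeysL subs).map (fun k => (k, PySem.Str.join "\n" (((pvAssigned subs P).filter (fun ap => ap.1 == k)).map (fun ap => ap.2)))) := by
  have hkeys : subs.foldl (fun ks h => if ks.contains h.1 then ks else ks ++ [h.1]) ["_general"] = pvKeysL subs := by
    unfold pvKeysL
    rw [PySem.Set.update, List.foldl_map]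
    rfl
  have hrep : List.replicate P.length ((none : Option String), (0 : Int))
      = (P.map PySem.Str.lower).map (fun _ => ((none : Option String), (0 : Int))) := by
    rw [← pvRepMap, List.length_map]
  have hbest : subs.foldl (fun best h =>
        let lk := h.2.2.2.map PySem.Str.lower
        List.zipWith (fun (b : Option String × Int) pl =>
          let s : Int := ((lk.countP (fun k => PySem.Str.isIn k pl)) : Int)
          if b.2 < s then (some h.1, s) else b) best (P.map PySem.Str.lower))
        (List.replicate P.length ((none : Option String), (0 : Int)))
      = P.map (fun p => pvBest subs (PySem.Str.lower p)) := by
    rw [hrep]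
    rw [pvZipFold subs
      (fun h (b : Option String × Int) pl =>
        if b.2 < (((h.2.2.2.map PySem.Str.lower).countP (fun k => PySem.Str.isIn k pl)) : Int)
        then (some h.1, (((h.2.2.2.map PySem.Str.lower).countP (fun k => PySem.Str.isIn k pl)) : Int)) else b)
      (P.map PySem.Str.lower) (fun _ => ((none : Option String), (0 : Int)))]
    rw [List.map_map]
    apply List.map_congr_left
    intro p _
    simp only [Function.comp]
    unfold pvBest
    apply PySem.List.foldl_congr_mem
    intro acc h _
    have : (((h.2.2.2.map PySem.Str.lower).countP (fun k => PySem.Str.isIn k (PySem.Str.lower p))) : Int)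
        = pvScore h.2.2.2 (PySem.Str.lower p) := by
      unfold pvScore; rw [List.countP_map]; rfl
    simp only [this]
  rw [hkeys, hbest]
  apply List.map_congr_left
  intro k _
  rw [pvZipSelf]
  congr 1
  rw [List.filter_map, List.map_map]
  unfold pvAssigned
  rw [List.filter_map, List.map_map]
  have hpred : ∀ p : String,
      ((fun pb : String × (Option String × Int) =>
          (if pb.2.1.getD "" ≠ "" ∧ 0 < pb.2.2 then pb.2.1.getD "" else "_general") == k)
        ∘ (fun p => (p, pvBest subs (PySem.Str.lower p)))) p
      = ((fun ap : String × String => ap.1 == k) ∘ (fun para => (pvKey subs para, para))) p := by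
    intro p
    simp only [Function.comp]
    unfold pvKey
    rfl
  rw [List.filter_congr (fun p _ => hpred p)]
  exact congrArg _ (List.map_congr_left (fun p _ => rfl))

-- ===== VERDICT (by name: the statement is the Claim_ definition above) =====
theorem distribute_to_subsections_py_spec : Claim_equal_distribute_to_subsections_py := by
  intro text subs _
  unfold Spec_distribute_to_subsections_py distribute_to_subsections_py distribute_to_subsections_py_alt
  dsimp only []
  by_cases hP : (((PySem.Str.split? text "\n").getD []).filterMap
      (fun p => if PySem.Str.strip p = "" then none else some (PySem.Str.strip p))) = []
  · rw [if_pos hP, if_pos hP]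
  · rw [if_neg hP, if_neg hP]
    exact (pvAout subs _).trans (pvBout subs _).symm
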